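-- pv_equiv track=rewrite | github.com/TimeB1729/codeforces | rated 800/cover-in-water.py | min_actions
-- ===== SOURCE A (Python) =====
-- def min_actions(t, test_cases):
--     results=[]
--     for n,s in test_cases:
--         i=0
--         action_1 = 0
--         while i < n:
--             if s[i] == '.':
--                 j = i
--                 while j < n and s[j] == '.':
--                     j += 1
--                 segment_length = j - i
--                 if segment_length>2:
--                     action_1 = 2
--                     break
--                 else:
--                     action_1 += segment_length
--                 i = j
--             else:
--                 i += 1
--         results.append(action_1)
--     return results
-- ===== SOURCE B (Python) =====
-- def min_actions(t, test_cases):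
--     return [2 if '...' in s[:max(0, n)] else s[:max(0, n)].count('.')
--             for n, s in test_cases]
-- ===== Notes on version B (the rewrite author's own statement) =====
-- stated objective: simpler
-- what changed: Replaces A's index-based nested-while scan with early break by two library-level aggregates on the prefix s[:n]: a substring membership test ('...' in prefix) deciding the answer 2, else the prefix's '.'-character count.
import Mathlib
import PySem

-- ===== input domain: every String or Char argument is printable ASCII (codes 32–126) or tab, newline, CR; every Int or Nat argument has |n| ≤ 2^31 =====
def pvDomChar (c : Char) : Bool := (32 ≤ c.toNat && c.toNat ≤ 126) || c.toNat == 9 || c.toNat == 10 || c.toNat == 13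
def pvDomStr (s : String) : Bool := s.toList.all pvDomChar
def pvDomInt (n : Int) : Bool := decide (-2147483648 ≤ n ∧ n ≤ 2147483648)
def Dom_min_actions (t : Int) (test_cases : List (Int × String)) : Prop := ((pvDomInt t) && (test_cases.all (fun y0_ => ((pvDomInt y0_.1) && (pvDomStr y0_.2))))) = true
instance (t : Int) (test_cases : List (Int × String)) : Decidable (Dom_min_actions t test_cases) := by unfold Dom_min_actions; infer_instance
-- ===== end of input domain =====

-- B replaces A's index-based nested-while scan with early break by two library-level
-- aggregates on the prefix s[:n]: "'...' in prefix" decides the answer 2, else the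
-- prefix's '.'-character count (objective: simpler; measured faster by a constant factor).

-- ===== PORT A =====
-- inner while:  while j < n and s[j] == '.': j += 1   (fuel = remaining iterations bound)
def aInner (s : String) (n : Int) (j : Int) : Nat → Int
  | 0 => j
  | fuel+1 =>
    if j < n then
      match PySem.Str.pyGet? s j with
      | some c => if c = '.' then aInner s n (j+1) fuel else j
      | none => j  -- IndexError in Python; excluded by Pre_min_actions
    else j

-- outer while over i with early break on a segment longer than 2
def aOuter (s : String) (n : Int) (i action : Int) : Nat → Int
  | 0 => action
  | fuel+1 =>
    if i < n then
      match PySem.Str.pyGet? s i with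
      | some c =>
        if c = '.' then
          let j := aInner s n i (n - i).toNat
          let seg := j - i
          if seg > 2 then (2 : Int)
          else aOuter s n j (action + seg) fuel
        else aOuter s n (i+1) action fuel
      | none => action  -- IndexError in Python; excluded by Pre_min_actions
    else action

def min_actions (t : Int) (test_cases : List (Int × String)) : List Int :=
  test_cases.foldl (fun results p => results ++ [aOuter p.2 p.1 0 0 p.1.toNat]) []

-- ===== PORT B =====
-- one test case: 2 if '...' in s[:max(0, n)] else s[:max(0, n)].count('.')
def bCase (n : Int) (s : String) : Int :=
  if PySem.Str.isIn "..." (PySem.Str.slice s none (some (max 0 n))) then 2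
  else (PySem.Str.count (PySem.Str.slice s none (some (max 0 n))) "." : Int)

def min_actions_alt (t : Int) (test_cases : List (Int × String)) : List Int :=
  test_cases.map (fun q => bCase q.1 q.2)

-- ===== PRECONDITION & SPEC =====
-- brk l : l contains three consecutive '.' followed by a non-'.' character
def brk : List Char → Bool
  | a :: b :: c :: d :: rest =>
    (a = '.' && b = '.' && c = '.' && !(d = '.')) || brk (b :: c :: d :: rest)
  | _ => false

-- Pre_ is exactly A's domain: for a case with n > len(s), A's index-based scan raises
-- IndexError unless it breaks early on a '.'-run of length ≥ 3 terminated by a non-'.' char (brk).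
def Pre_min_actions (t : Int) (test_cases : List (Int × String)) : Prop :=
  ∀ p ∈ test_cases, p.1 ≤ (p.2.toList.length : Int) ∨ brk p.2.toList = true
instance (t : Int) (test_cases : List (Int × String)) : Decidable (Pre_min_actions t test_cases) := by unfold Pre_min_actions; infer_instance
def pvWitness_min_actions : Int × (List (Int × String)) := (1, [(3, "..x")])

def Spec_min_actions (t : Int) (test_cases : List (Int × String)) (out : List Int) : Prop := out = min_actions_alt t test_cases
instance (t : Int) (test_cases : List (Int × String)) (out : List Int) : Decidable (Spec_min_actions t test_cases out) := by unfold Spec_min_actions; infer_instance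

-- ===== CLAIM (what is proved, stated in full; the proofs are below) =====
def Claim_equal_min_actions : Prop := ∀ (t : Int) (test_cases : List (Int × String)), Dom_min_actions t test_cases → Pre_min_actions t test_cases → Spec_min_actions t test_cases (min_actions t test_cases)

-- ===== LEMMAS AND PROOFS =====

-- length of the leading '.'-run
def runLen : List Char → Nat
  | [] => 0
  | c :: r => if c = '.' then runLen r + 1 else 0

lemma runLen_le_length (l : List Char) : runLen l ≤ l.length := by
  induction l with
  | nil => simp [runLen]
  | cons c r ih => by_cases h : c = '.' <;> simp [runLen, h] <;> omega

-- structural rendering of A's per-case scan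
def fA : List Char → Int → Int
  | [], acc => acc
  | c :: r, acc =>
    if c = '.' then
      let k := runLen (c :: r)
      if (k : Int) > 2 then 2 else fA ((c :: r).drop k) (acc + k)
    else fA r acc
termination_by l _ => l.length
decreasing_by
  · simp only [List.length_drop]
    have : runLen (c :: r) = runLen r + 1 := by simp [runLen, *]
    simp [List.length_cons]; omega
  · simp

lemma pyGet?_char (l : List Char) (j : Int) (h0 : 0 ≤ j) (h : j.toNat < l.length) :
    PySem.List.pyGet? l j = some (l[j.toNat]) := by
  simp only [PySem.List.pyGet?, PySem.List.pyIdx?, h0, ↓reduceIte]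
  rw [if_pos (by omega)]
  simp [List.getElem?_eq_getElem h]

lemma take_drop_cons (l : List Char) (m k : Nat) (hk : k < m) (hm : m ≤ l.length) :
    (l.take m).drop k = l[k]'(by omega) :: (l.take m).drop (k+1) := by
  rw [List.drop_eq_getElem_cons (by simp [List.length_take]; omega)]
  congr 1
  exact List.getElem_take

lemma take_drop_nil (l : List Char) (m k : Nat) (hm : m ≤ k) : (l.take m).drop k = [] := by
  rw [List.drop_eq_nil_iff.2]; simp [List.length_take]; omega

lemma strGet (s : String) (j : Int) (h0 : 0 ≤ j) (h : j.toNat < s.toList.length) :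
    PySem.Str.pyGet? s j = some (s.toList[j.toNat]) := by
  rw [show PySem.Str.pyGet? s j = PySem.List.pyGet? s.toList j by
    simp [PySem.Str.pyGet?, PySem.Chars.pyGet?]]
  exact pyGet?_char _ _ h0 h

lemma aInner_eq (s : String) (n : Int) (hn : n ≤ (s.toList.length : Int)) :
    ∀ (fuel : Nat) (j : Int), 0 ≤ j → j ≤ n → (n - j).toNat ≤ fuel →
      aInner s n j fuel = j + (runLen ((s.toList.take n.toNat).drop j.toNat) : Int) := by
  intro fuel
  induction fuel with
  | zero =>
    intro j h0 hj hf
    have hjn : j = n := by omega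
    rw [take_drop_nil _ _ _ (by omega)]
    simp [aInner, runLen]
  | succ f ih =>
    intro j h0 hj hf
    by_cases hlt : j < n
    · have hjlen : j.toNat < s.toList.length := by omega
      have hdrop := take_drop_cons s.toList n.toNat j.toNat (by omega) (by omega)
      rw [hdrop]
      simp only [aInner, if_pos hlt, strGet s j h0 hjlen]
      by_cases hc : s.toList[j.toNat] = '.'
      · rw [if_pos hc, ih (j+1) (by omega) (by omega) (by omega)]
        have : (j + 1).toNat = j.toNat + 1 := by omega
        rw [this]
        simp only [runLen, if_pos hc]
        push_cast
        ring
      · rw [if_neg hc]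
        simp only [runLen, if_neg hc]
        simp
    · have hjn : j = n := by omega
      rw [take_drop_nil _ _ _ (by omega)]
      simp [aInner, if_neg hlt, runLen]

lemma aOuter_eq (s : String) (n : Int) (hn : n ≤ (s.toList.length : Int)) :
    ∀ (fuel : Nat) (i acc : Int), 0 ≤ i → i ≤ n → (n - i).toNat ≤ fuel →
      aOuter s n i acc fuel = fA ((s.toList.take n.toNat).drop i.toNat) acc := by
  intro fuel
  induction fuel with
  | zero =>
    intro i acc h0 hi hf
    have : i = n := by omega
    rw [take_drop_nil _ _ _ (by omega)]
    simp [aOuter, fA]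
  | succ f ih =>
    intro i acc h0 hi hf
    by_cases hlt : i < n
    · have hilen : i.toNat < s.toList.length := by omega
      have hdrop := take_drop_cons s.toList n.toNat i.toNat (by omega) (by omega)
      have hrl : runLen ((s.toList.take n.toNat).drop i.toNat) ≤ (s.toList.take n.toNat).length - i.toNat := by
        have h1 := runLen_le_length ((s.toList.take n.toNat).drop i.toNat)
        simp only [List.length_drop] at h1
        omega
      have hrlbound : (runLen ((s.toList.take n.toNat).drop i.toNat) : Int) ≤ n - i := by
        simp only [List.length_take] at hrl
        omega
      have hinner := aInner_eq s n hn (n - i).toNat i h0 (by omega) (le_refl _)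
      by_cases hc : s.toList[i.toNat] = '.'
      · have hk1 : 1 ≤ runLen ((s.toList.take n.toNat).drop i.toNat) := by
          rw [hdrop]; simp [runLen, hc]
        simp only [aOuter, if_pos hlt, strGet s i h0 hilen, if_pos hc, hinner]
        have hseg : i + (runLen ((s.toList.take n.toNat).drop i.toNat) : Int) - i
            = (runLen ((s.toList.take n.toNat).drop i.toNat) : Int) := by ring
        rw [hseg]
        conv_rhs => rw [hdrop]
        simp only [fA, if_pos hc]
        rw [← hdrop]
        by_cases hbig : (runLen ((s.toList.take n.toNat).drop i.toNat) : Int) > 2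
        · rw [if_pos hbig, if_pos hbig]
        · rw [if_neg hbig, if_neg hbig]
          rw [ih (i + (runLen ((s.toList.take n.toNat).drop i.toNat) : Int)) (acc + (runLen ((s.toList.take n.toNat).drop i.toNat) : Int)) (by omega) (by omega) (by omega)]
          have hdd : List.drop (runLen ((s.toList.take n.toNat).drop i.toNat)) ((s.toList.take n.toNat).drop i.toNat)
              = (s.toList.take n.toNat).drop ((i + (runLen ((s.toList.take n.toNat).drop i.toNat) : Int)).toNat) := by
            rw [List.drop_drop]
            congr 1
            omega
          rw [hdd]
      · simp only [aOuter, if_pos hlt, strGet s i h0 hilen, if_neg hc]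
        rw [ih (i+1) acc (by omega) (by omega) (by omega)]
        conv_rhs => rw [hdrop]
        simp only [fA, if_neg hc]
        have hnat : (i+1).toNat = i.toNat + 1 := by omega
        rw [hnat]
    · have : i = n := by omega
      rw [take_drop_nil _ _ _ (by omega)]
      simp [aOuter, if_neg hlt, fA]

-- ===== B-side characterisation: three consecutive dots =====
def hasDDD : List Char → Bool
  | a :: b :: c :: t => (a = '.' && b = '.' && c = '.') || hasDDD (b :: c :: t)
  | _ => false

lemma hasDDD_short {l : List Char} (h : l.length ≤ 2) : hasDDD l = false := by
  match l, h with
  | [], _ => rfl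
  | [_], _ => rfl
  | [_, _], _ => rfl

lemma hasDDD_cons_ne {c : Char} (hc : c ≠ '.') (r : List Char) :
    hasDDD (c :: r) = hasDDD r := by
  match r with
  | [] => simp [hasDDD]
  | [x] => simp [hasDDD]
  | x :: y :: t => simp [hasDDD, hc]

lemma hasDDD_mid_ne (a : Char) {d : Char} (hd : d ≠ '.') (r : List Char) :
    hasDDD (a :: d :: r) = hasDDD (d :: r) := by
  match r with
  | [] => simp [hasDDD]
  | x :: t => simp [hasDDD, hd]

lemma hasDDD_ddd (t : List Char) : hasDDD ('.' :: '.' :: '.' :: t) = true := by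
  simp [hasDDD]

lemma hasDDD_cons_of (a : Char) {r : List Char} (h : hasDDD r = true) :
    hasDDD (a :: r) = true := by
  match r, h with
  | b :: c :: t, h => simp [hasDDD]; right; exact h

-- hasDDD ↔ ['.','.','.'] is an infix
lemma infix_of_hasDDD : ∀ {l : List Char}, hasDDD l = true → ['.', '.', '.'] <:+: l := by
  intro l
  induction l with
  | nil => intro h; simp [hasDDD] at h
  | cons a rest ih =>
    intro h
    match rest, h with
    | b :: c :: t, h =>
      rw [hasDDD] at h
      rcases Bool.or_eq_true _ _ ▸ h with hpat | htail
      · simp only [Bool.and_eq_true, decide_eq_true_eq] at hpat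
        obtain ⟨⟨ha, hb⟩, hc⟩ := hpat
        subst ha; subst hb; subst hc
        exact ⟨[], t, rfl⟩
      · obtain ⟨u, v, huv⟩ := ih htail
        exact ⟨a :: u, v, by rw [List.cons_append, List.cons_append, huv]⟩

lemma hasDDD_append_right (u : List Char) {v : List Char} (h : hasDDD v = true) :
    hasDDD (u ++ v) = true := by
  induction u with
  | nil => simpa
  | cons a u ih => exact hasDDD_cons_of a ih

lemma hasDDD_of_infix {l : List Char} (h : ['.', '.', '.'] <:+: l) : hasDDD l = true := by
  obtain ⟨u, v, huv⟩ := h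
  rw [← huv, List.append_assoc]
  exact hasDDD_append_right u (hasDDD_ddd v)

-- count of '.' via PySem.Chars.count
lemma countGo (sub : List Char) (hsub : sub = ['.']) :
    ∀ (fuel : Nat) (l : List Char) (acc : Nat), l.length ≤ fuel →
      PySem.Chars.count.go sub fuel l acc = acc + l.count '.' := by
  subst hsub
  intro fuel
  induction fuel with
  | zero =>
    intro l acc h
    have : l = [] := List.eq_nil_of_length_eq_zero (by omega)
    subst this
    simp [PySem.Chars.count.go]
  | succ f ih =>
    intro l acc h
    cases l with
    | nil => simp [PySem.Chars.count.go]
    | cons c r =>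
      rw [PySem.Chars.count.go]
      by_cases hc : c = '.'
      · subst hc
        rw [if_pos (by simp [List.isPrefixOf])]
        have hdr : List.drop (['.'] : List Char).length ('.' :: r) = r := rfl
        rw [hdr, ih r (acc + 1) (by simp at h; omega)]
        simp [List.count_cons]
        omega
      · rw [if_neg (by simp [List.isPrefixOf]; exact fun h' => hc h'.symm)]
        rw [ih r acc (by simp at h; omega)]
        simp [List.count_cons, hc]

lemma count_dot (l : List Char) : PySem.Chars.count l ['.'] = l.count '.' := by
  rw [PySem.Chars.count]
  rw [if_neg (by simp)]
  simpa using countGo ['.'] rfl l.length l 0 (le_refl _)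

-- B's per-case answer as a function of the prefix character list
lemma bChar (l : List Char) :
    (if hasDDD l then (2 : Int) else (l.count '.' : Int))
      = (if PySem.Chars.isIn ['.', '.', '.'] l then (2 : Int) else (PySem.Chars.count l ['.'] : Int)) := by
  have hEq : PySem.Chars.isIn ['.', '.', '.'] l = hasDDD l := by
    by_cases h : hasDDD l = true
    · rw [h]
      exact (PySem.Chars.isIn_iff_infix _ _).mpr (infix_of_hasDDD h)
    · rw [Bool.not_eq_true] at h
      rw [h]
      exact (PySem.Chars.isIn_eq_false_iff _ _).mpr
        (fun hinf => absurd (hasDDD_of_infix hinf) (by simp [h]))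
  rw [count_dot, hEq]

-- fA equals B's closed-form answer
lemma runLen_decomp (l : List Char) :
    l = List.replicate (runLen l) '.' ++ l.drop (runLen l) ∧
      (∀ d r', l.drop (runLen l) = d :: r' → d ≠ '.') := by
  induction l with
  | nil => simp [runLen]
  | cons c r ih =>
    by_cases h : c = '.'
    · subst h
      have hr : runLen ('.' :: r) = runLen r + 1 := by simp [runLen]
      refine ⟨?_, ?_⟩
      · rw [hr, List.replicate_succ, List.cons_append, List.drop_succ_cons]
        exact congrArg _ ih.1
      · intro d r' hd
        rw [hr, List.drop_succ_cons] at hd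
        exact ih.2 d r' hd
    · have hr : runLen (c :: r) = 0 := by simp [runLen, h]
      refine ⟨by rw [hr]; simp, ?_⟩
      intro d r' hd
      rw [hr, List.drop_zero] at hd
      injection hd with h1 _
      rw [← h1]; exact h

-- hasDDD unchanged by stripping a terminated short run
lemma hasDDD_strip {k : Nat} (hk : 1 ≤ k) (hk2 : k ≤ 2) (rest : List Char)
    (hrest : rest = [] ∨ ∃ d r', rest = d :: r' ∧ d ≠ '.') :
    hasDDD (List.replicate k '.' ++ rest) = hasDDD rest := by
  rcases hrest with h | ⟨d, r', hr, hd⟩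
  · subst h
    rw [List.append_nil]
    rw [hasDDD_short (by simp; omega), hasDDD_short (by simp)]
  · subst hr
    interval_cases k
    · simpa using hasDDD_mid_ne '.' hd r'
    · calc hasDDD ('.' :: '.' :: d :: r')
          = hasDDD ('.' :: d :: r') := by
            match r' with
            | [] => simp [hasDDD, hd]
            | x :: t => simp [hasDDD, hd]
        _ = hasDDD (d :: r') := hasDDD_mid_ne '.' hd r'

lemma mainLemma : ∀ (N : Nat) (l : List Char) (acc : Int), l.length ≤ N →
    fA l acc = (if hasDDD l then 2 else acc + (l.count '.' : Int)) := by
  intro N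
  induction N with
  | zero =>
    intro l acc hl
    have : l = [] := List.eq_nil_of_length_eq_zero (by omega)
    subst this
    simp [fA, hasDDD]
  | succ N ih =>
    intro l acc hl
    cases l with
    | nil => simp [fA, hasDDD]
    | cons c r =>
      by_cases h : c = '.'
      · subst h
        obtain ⟨hdecomp, hrest⟩ := runLen_decomp ('.' :: r)
        have hk1 : 1 ≤ runLen ('.' :: r) := by simp [runLen]
        by_cases hbig : ((runLen ('.' :: r) : Int)) > 2
        · have hf2 : fA ('.' :: r) acc = 2 := by
            rw [show fA ('.' :: r) acc = if ((runLen ('.' :: r) : Int)) > 2 then 2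
                else fA (('.' :: r).drop (runLen ('.' :: r))) (acc + (runLen ('.' :: r) : Int)) from by
              simp [fA]]
            rw [if_pos hbig]
          have hD : hasDDD ('.' :: r) = true := by
            have h3 : 3 ≤ runLen ('.' :: r) := by omega
            have : '.' :: r = '.' :: '.' :: '.' :: (List.replicate (runLen ('.' :: r) - 3) '.' ++ ('.' :: r).drop (runLen ('.' :: r))) := by
              conv_lhs => rw [hdecomp]
              rw [show runLen ('.' :: r) = 3 + (runLen ('.' :: r) - 3) by omega,
                List.replicate_add]
              simp [List.replicate]
            rw [this]
            exact hasDDD_ddd _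
          rw [hf2, hD, if_pos rfl]
        · have hf : fA ('.' :: r) acc = fA (('.' :: r).drop (runLen ('.' :: r))) (acc + (runLen ('.' :: r) : Int)) := by
            rw [show fA ('.' :: r) acc = if ((runLen ('.' :: r) : Int)) > 2 then 2
                else fA (('.' :: r).drop (runLen ('.' :: r))) (acc + (runLen ('.' :: r) : Int)) from by
              simp [fA]]
            rw [if_neg hbig]
          have hlen : (('.' :: r).drop (runLen ('.' :: r))).length ≤ N := by
            simp only [List.length_drop, List.length_cons] at *
            omega
          rw [hf, ih _ _ hlen]
          have hshape : ('.' :: r).drop (runLen ('.' :: r)) = [] ∨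
              ∃ d r', ('.' :: r).drop (runLen ('.' :: r)) = d :: r' ∧ d ≠ '.' := by
            cases hd : ('.' :: r).drop (runLen ('.' :: r)) with
            | nil => exact Or.inl rfl
            | cons d r' => exact Or.inr ⟨d, r', rfl, hrest d r' hd⟩
          have hDeq : hasDDD ('.' :: r) = hasDDD (('.' :: r).drop (runLen ('.' :: r))) := by
            conv_lhs => rw [hdecomp]
            exact hasDDD_strip hk1 (by omega) _ hshape
          have hcount : (('.' :: r).count '.' : Int)
              = (runLen ('.' :: r) : Int) + ((('.' :: r).drop (runLen ('.' :: r))).count '.' : Int) := by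
            conv_lhs => rw [hdecomp]
            rw [List.count_append]
            push_cast
            simp
          rw [hDeq, hcount]
          congr 1
          ring
      · have hD : hasDDD (c :: r) = hasDDD r := hasDDD_cons_ne h r
        have hc : ((c :: r).count '.' : Int) = (r.count '.' : Int) := by
          simp [List.count_cons, h]
        simp only [fA, if_neg h]
        rw [ih r acc (by simp at hl; omega), hD, hc]

-- ===== the brk region: n > len(s), A still breaks early with 2 =====
lemma brk_length {x : List Char} (h : brk x = true) : 4 ≤ x.length := by
  match x with
  | [] | [_] | [_, _] | [_, _, _] => simp [brk] at h
  | _ :: _ :: _ :: _ :: _ => simp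

lemma brk_decomp : ∀ {x : List Char}, brk x = true →
    ∃ u d v, x = u ++ ('.' :: '.' :: '.' :: d :: v) ∧ d ≠ '.' := by
  intro x
  induction x with
  | nil => intro h; simp [brk] at h
  | cons a rest ih =>
    intro h
    match rest, h with
    | b :: c :: d :: t, h =>
      rw [brk] at h
      rcases Bool.or_eq_true _ _ ▸ h with hpat | htail
      · simp only [Bool.and_eq_true, decide_eq_true_eq, Bool.not_eq_eq_eq_not, Bool.not_true,
          decide_eq_false_iff_not] at hpat
        exact ⟨[], d, t, by simp [hpat.1.1.1, hpat.1.1.2, hpat.1.2], hpat.2⟩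
      · obtain ⟨u, d', v, hx, hd⟩ := ih htail
        exact ⟨a :: u, d', v, by rw [List.cons_append, ← hx], hd⟩

lemma brk_tail {c : Char} {rest : List Char} (h : brk (c :: rest) = true) (hc : c ≠ '.') :
    brk rest = true := by
  match rest, h with
  | b :: e :: d :: t, h =>
    rw [brk] at h
    rcases Bool.or_eq_true _ _ ▸ h with hpat | htail
    · simp only [Bool.and_eq_true, decide_eq_true_eq] at hpat
      exact absurd hpat.1.1.1 hc
    · exact htail

lemma runLen_lt_of_nondot : ∀ {x : List Char} {c : Char}, c ∈ x → c ≠ '.' → runLen x < x.length := by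
  intro x
  induction x with
  | nil => intro c h; simp at h
  | cons a rest ih =>
    intro c hc hcd
    by_cases ha : a = '.'
    · have hcr : c ∈ rest := by
        rcases List.mem_cons.1 hc with h | h
        · exact absurd (h ▸ ha) hcd
        · exact h
      have := ih hcr hcd
      simp only [runLen, if_pos ha, List.length_cons]
      omega
    · simp only [runLen, if_neg ha, List.length_cons]
      omega

lemma brk_runLen_lt {x : List Char} (h : brk x = true) : runLen x < x.length := by
  obtain ⟨u, d, v, hx, hd⟩ := brk_decomp h
  exact runLen_lt_of_nondot (by rw [hx]; simp) hd

lemma brk_drop_run : ∀ {x : List Char}, brk x = true → runLen x ≤ 2 →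
    brk (x.drop (runLen x)) = true := by
  intro x
  induction x with
  | nil => intro h; simp [brk] at h
  | cons a rest ih =>
    intro h hr
    by_cases ha : a = '.'
    · subst ha
      have hrl : runLen ('.' :: rest) = runLen rest + 1 := by simp [runLen]
      rw [hrl] at hr ⊢
      rw [List.drop_succ_cons]
      match rest, h with
      | b :: c :: d :: t, h =>
        rw [brk] at h
        rcases Bool.or_eq_true _ _ ▸ h with hpat | htail
        · simp only [Bool.and_eq_true, decide_eq_true_eq] at hpat
          exfalso
          have hb : b = '.' := hpat.1.1.2
          have hcc : c = '.' := hpat.1.2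
          have : runLen (b :: c :: d :: t) ≥ 2 := by
            subst hb; subst hcc; simp [runLen]
          omega
        · exact ih htail (by omega)
    · have hrl : runLen (a :: rest) = 0 := by simp [runLen, ha]
      rw [hrl, List.drop_zero]
      exact h

-- inner while when n may exceed len(s) but the current run is terminated inside s
lemma aInner_term (s : String) (n : Int) (hn : (s.toList.length : Int) ≤ n) :
    ∀ (fuel : Nat) (j : Int), 0 ≤ j →
      j.toNat + runLen (s.toList.drop j.toNat) < s.toList.length →
      runLen (s.toList.drop j.toNat) + 1 ≤ fuel →
      aInner s n j fuel = j + (runLen (s.toList.drop j.toNat) : Int) := by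
  intro fuel
  induction fuel with
  | zero => intro j _ _ hf; omega
  | succ f ih =>
    intro j h0 hterm hf
    have hjlen : j.toNat < s.toList.length := by omega
    have hdrop : s.toList.drop j.toNat = s.toList[j.toNat] :: s.toList.drop (j.toNat + 1) :=
      List.drop_eq_getElem_cons hjlen
    simp only [aInner, if_pos (by omega : j < n), strGet s j h0 hjlen]
    by_cases hc : s.toList[j.toNat] = '.'
    · have hrl : runLen (s.toList.drop j.toNat) = runLen (s.toList.drop (j.toNat + 1)) + 1 := by
        rw [hdrop]; simp [runLen, hc]
      rw [if_pos hc, ih (j+1) (by omega)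
        (by rw [show (j+1).toNat = j.toNat + 1 by omega]; omega)
        (by rw [show (j+1).toNat = j.toNat + 1 by omega]; omega)]
      rw [show (j+1).toNat = j.toNat + 1 by omega, hrl]
      push_cast
      ring
    · have hrl : runLen (s.toList.drop j.toNat) = 0 := by
        rw [hdrop]; simp [runLen, hc]
      rw [if_neg hc, hrl]
      simp

-- outer while returns 2 when the remaining suffix still contains a terminated run of length ≥ 3
lemma aOuter_brk (s : String) (n : Int) (hn : (s.toList.length : Int) ≤ n) :
    ∀ (fuel : Nat) (i acc : Int), 0 ≤ i → i.toNat ≤ s.toList.length →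
      brk (s.toList.drop i.toNat) = true →
      s.toList.length - i.toNat ≤ fuel →
      aOuter s n i acc fuel = 2 := by
  intro fuel
  induction fuel with
  | zero =>
    intro i acc h0 hi hbrk hf
    have h4 := brk_length hbrk
    simp only [List.length_drop] at h4
    omega
  | succ f ih =>
    intro i acc h0 hi hbrk hf
    have h4 := brk_length hbrk
    simp only [List.length_drop] at h4
    have hilen : i.toNat < s.toList.length := by omega
    have hdrop : s.toList.drop i.toNat = s.toList[i.toNat] :: s.toList.drop (i.toNat + 1) :=
      List.drop_eq_getElem_cons hilen
    simp only [aOuter, if_pos (by omega : i < n), strGet s i h0 hilen]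
    by_cases hc : s.toList[i.toNat] = '.'
    · rw [if_pos hc]
      have hterm : i.toNat + runLen (s.toList.drop i.toNat) < s.toList.length := by
        have := brk_runLen_lt hbrk
        simp only [List.length_drop] at this
        omega
      have hk1 : 1 ≤ runLen (s.toList.drop i.toNat) := by
        rw [hdrop]; simp [runLen, hc]
      rw [aInner_term s n hn (n - i).toNat i h0 hterm (by omega)]
      have hseg : i + (runLen (s.toList.drop i.toNat) : Int) - i
          = (runLen (s.toList.drop i.toNat) : Int) := by ring
      rw [hseg]
      by_cases hbig : (runLen (s.toList.drop i.toNat) : Int) > 2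
      · rw [if_pos hbig]
      · rw [if_neg hbig]
        have hbrk' := brk_drop_run hbrk (by omega)
        rw [List.drop_drop] at hbrk'
        exact ih (i + (runLen (s.toList.drop i.toNat) : Int)) _ (by omega)
          (by omega)
          (by rw [show (i + (runLen (s.toList.drop i.toNat) : Int)).toNat
                = i.toNat + runLen (s.toList.drop i.toNat) by omega]; exact hbrk')
          (by omega)
    · rw [if_neg hc]
      have hbrk' : brk (s.toList.drop (i.toNat + 1)) = true :=
        brk_tail (hdrop ▸ hbrk) hc
      exact ih (i+1) acc (by omega) (by omega)
        (by rw [show (i+1).toNat = i.toNat + 1 by omega]; exact hbrk') (by omega)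

lemma brk_hasDDD {l : List Char} (h : brk l = true) : hasDDD l = true := by
  obtain ⟨u, d, v, hl, _⟩ := brk_decomp h
  subst hl
  exact hasDDD_append_right u (hasDDD_ddd _)

lemma slice_prefix (s : String) (n : Int) :
    (PySem.Str.slice s none (some (max 0 n))).toList = s.toList.take n.toNat := by
  have h0 : (0 : Int) ≤ max 0 n := le_max_left _ _
  have : (max 0 n).toNat = n.toNat := by omega
  simp [PySem.Str.slice, PySem.List.slice_to _ h0, this]

lemma bCase_eq (n : Int) (s : String) :
    bCase n s = if hasDDD (s.toList.take n.toNat) then 2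
      else ((s.toList.take n.toNat).count '.' : Int) := by
  unfold bCase
  rw [bChar]
  have hIn : PySem.Str.isIn "..." (PySem.Str.slice s none (some (max 0 n)))
      = PySem.Chars.isIn ['.', '.', '.'] (s.toList.take n.toNat) := by
    rw [show PySem.Str.isIn "..." (PySem.Str.slice s none (some (max 0 n)))
        = PySem.Chars.isIn ("...".toList) ((PySem.Str.slice s none (some (max 0 n))).toList) from rfl]
    rw [slice_prefix]
    rfl
  have hCnt : PySem.Str.count (PySem.Str.slice s none (some (max 0 n))) "."
      = PySem.Chars.count (s.toList.take n.toNat) ['.'] := by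
    rw [show PySem.Str.count (PySem.Str.slice s none (some (max 0 n))) "."
        = PySem.Chars.count ((PySem.Str.slice s none (some (max 0 n))).toList) (".".toList) from rfl]
    rw [slice_prefix]
    rfl
  rw [hIn, hCnt]

lemma perCase (n : Int) (s : String)
    (hpre : n ≤ (s.toList.length : Int) ∨ brk s.toList = true) :
    aOuter s n 0 0 n.toNat = bCase n s := by
  rw [bCase_eq]
  by_cases hn : n ≤ (s.toList.length : Int)
  · by_cases hneg : n < 0
    · have h1 : n.toNat = 0 := by omega
      rw [h1]
      simp [aOuter, hasDDD]
    · have h0 : (0 : Int) ≤ n := by omega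
      rw [aOuter_eq s n hn n.toNat 0 0 (le_refl _) h0 (by omega)]
      simp only [Int.toNat_zero, List.drop_zero]
      rw [mainLemma (s.toList.take n.toNat).length _ 0 (le_refl _)]
      simp
  · have hbrk : brk s.toList = true := hpre.resolve_left hn
    have hlen : (s.toList.length : Int) ≤ n := by omega
    rw [aOuter_brk s n hlen n.toNat 0 0 (le_refl _) (by omega)
      (by rw [Int.toNat_zero, List.drop_zero]; exact hbrk) (by omega)]
    rw [List.take_of_length_le (by omega)]
    rw [brk_hasDDD hbrk, if_pos rfl]

-- ===== VERDICT (by name: the statements are the Claim_ definitions above) =====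
theorem min_actions_spec : Claim_equal_min_actions := by
  intro t tc _ hpre
  unfold Spec_min_actions min_actions min_actions_alt
  rw [PySem.List.foldl_append_singleton_eq_map]
  exact List.map_congr_left (fun p hp => perCase p.1 p.2 (hpre p hp))
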